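-- pv_equiv track=rewrite | github.com/hadrizia/coding | code/ad_hoc/list_2/stripe.py | stripe
-- ===== SOURCE A (Python) =====
-- def stripe(len_numbers, numbers):
--   n = 0
--
--   stripe_1 = numbers[0]
--   stripe_2 = sum(numbers[1:])
--
--   for i in range(1, len_numbers):
--     if stripe_1 == stripe_2:
--       n += 1
--     stripe_1 += numbers[i]
--     stripe_2 -= numbers[i]
--
--   return n
-- ===== SOURCE B (Python) =====
-- def stripe(len_numbers, numbers):
--   # Build the full prefix-sum table first, then a second pass scans it.
--   p = []
--   acc = 0
--   for x in numbers:
--     acc += x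
--     p.append(acc)
--   total = p[-1]
--   n = 0
--   for i in range(1, len_numbers):
--     if 2 * p[i - 1] == total:
--       n += 1
--   return n
-- ===== Notes on version B (the rewrite author's own statement) =====
-- stated objective: alternative
-- what changed: Replaces A's single-pass dual-accumulator loop with a build-the-prefix-sum-table pass followed by a separate scan that counts indices i with 2*p[i-1] == total.
import Mathlib
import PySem

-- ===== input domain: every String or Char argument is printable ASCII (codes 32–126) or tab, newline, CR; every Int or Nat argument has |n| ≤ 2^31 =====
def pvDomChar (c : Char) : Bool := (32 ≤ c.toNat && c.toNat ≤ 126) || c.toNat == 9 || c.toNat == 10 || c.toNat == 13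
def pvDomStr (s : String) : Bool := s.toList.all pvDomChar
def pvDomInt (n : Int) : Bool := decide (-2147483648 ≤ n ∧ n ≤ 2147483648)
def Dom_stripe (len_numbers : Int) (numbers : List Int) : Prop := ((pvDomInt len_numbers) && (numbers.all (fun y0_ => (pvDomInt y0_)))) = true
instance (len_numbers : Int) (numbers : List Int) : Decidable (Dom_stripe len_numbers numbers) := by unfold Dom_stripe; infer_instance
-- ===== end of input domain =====

-- B builds the full prefix-sum table in one pass, then a second pass counts the
-- split points with 2*p[i-1] == total, instead of A's dual running accumulators.

-- ===== PORT A =====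
def stripe (len_numbers : Int) (numbers : List Int) : Int :=
  let n : Int := 0
  let stripe1 : Int := (PySem.List.pyGet? numbers 0).getD 0
  let stripe2 : Int := (PySem.List.slice numbers (some 1) none).sum
  let r := (PySem.List.pyRange 1 len_numbers 1).foldl
    (fun (st : Int × Int × Int) i =>
      let n' := if st.2.1 == st.2.2 then st.1 + 1 else st.1
      let x := (PySem.List.pyGet? numbers i).getD 0
      (n', st.2.1 + x, st.2.2 - x)) (n, stripe1, stripe2)
  r.1

-- ===== PORT B =====
def stripe_alt (len_numbers : Int) (numbers : List Int) : Int :=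
  let p := (numbers.foldl (fun (st : List Int × Int) x =>
      (st.1 ++ [st.2 + x], st.2 + x)) ([], 0)).1
  let total := (PySem.List.pyGet? p (-1)).getD 0
  (PySem.List.pyRange 1 len_numbers 1).foldl
    (fun n i => if 2 * (PySem.List.pyGet? p (i - 1)).getD 0 == total then n + 1 else n) 0

-- ===== PRECONDITION & SPEC =====
-- A raises IndexError on numbers = [] (numbers[0]) and when len_numbers > len(numbers)
-- (numbers[i] inside the loop); exactly those inputs are excluded.
def Pre_stripe (len_numbers : Int) (numbers : List Int) : Prop :=
  numbers ≠ [] ∧ len_numbers ≤ numbers.length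

instance (len_numbers : Int) (numbers : List Int) : Decidable (Pre_stripe len_numbers numbers) := by
  unfold Pre_stripe; infer_instance

def pvWitness_stripe : Int × List Int := (4, [1, 2, 3, 0])

def Spec_stripe (len_numbers : Int) (numbers : List Int) (out : Int) : Prop := out = stripe_alt len_numbers numbers
instance (len_numbers : Int) (numbers : List Int) (out : Int) : Decidable (Spec_stripe len_numbers numbers out) := by unfold Spec_stripe; infer_instance

-- ===== CLAIM (what is proved, stated in full; the proofs are below) =====
def Claim_equal_stripe : Prop := ∀ (len_numbers : Int) (numbers : List Int), Dom_stripe len_numbers numbers → Pre_stripe len_numbers numbers → Spec_stripe len_numbers numbers (stripe len_numbers numbers)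

-- ===== LEMMAS AND PROOFS =====

-- The table B builds is the list of prefix sums.
theorem pv_build_aux (xs l : List Int) (acc : Int) :
    xs.foldl (fun (st : List Int × Int) x => (st.1 ++ [st.2 + x], st.2 + x)) (l, acc)
      = (l ++ (List.range xs.length).map (fun k => acc + (xs.take (k + 1)).sum),
         acc + xs.sum) := by
  induction xs generalizing l acc with
  | nil => simp
  | cons x t ih =>
    simp only [List.foldl_cons, ih, List.length_cons, List.range_succ_eq_map,
      List.map_cons, List.map_map, List.sum_cons]
    simp only [Prod.mk.injEq]
    constructor
    · rw [List.append_assoc]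
      congr 1
      simp only [List.take_succ_cons, List.sum_cons, List.singleton_append]
      congr 1
      · simp
      · apply List.map_congr_left
        intro k _
        simp [Function.comp]
        ring
    · ring

theorem pv_table_eq (numbers : List Int) :
    (numbers.foldl (fun (st : List Int × Int) x => (st.1 ++ [st.2 + x], st.2 + x)) ([], 0)).1
      = (List.range numbers.length).map (fun k => (numbers.take (k + 1)).sum) := by
  rw [pv_build_aux]; simp

theorem pv_table_get (numbers : List Int) (i : Int) (h1 : 1 ≤ i) (h2 : i ≤ numbers.length) :
    (PySem.List.pyGet? ((List.range numbers.length).map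
        (fun k => (numbers.take (k + 1)).sum)) (i - 1)).getD 0
      = (numbers.take i.toNat).sum := by
  have h0 : (0:Int) ≤ i - 1 := by omega
  rw [PySem.List.pyGet?_of_nonneg _ h0]
  have hlt : (i - 1).toNat < numbers.length := by omega
  rw [List.getElem?_map]
  simp only [List.getElem?_range hlt, Option.map_some, Option.getD_some]
  have h3 : (i - 1).toNat + 1 = i.toNat := by omega
  rw [h3]

theorem pv_total (numbers : List Int) (h : numbers ≠ []) :
    (PySem.List.pyGet? ((List.range numbers.length).map
        (fun k => (numbers.take (k + 1)).sum)) (-1)).getD 0 = numbers.sum := by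
  have hlen : 0 < numbers.length := List.length_pos_iff.mpr h
  rw [PySem.List.pyGet?_neg_one, List.getLast?_eq_getElem?]
  simp only [List.length_map, List.length_range]
  rw [List.getElem?_map, List.getElem?_range (by omega)]
  simp only [Option.map_some, Option.getD_some]
  have h1 : numbers.length - 1 + 1 = numbers.length := by omega
  rw [h1, List.take_length]

-- Main loop invariant: A's fold from (n, S a, total − S a) returns the same count as B's fold.
theorem pv_loop (numbers : List Int) (b : Int) (hb : b ≤ numbers.length) :
    ∀ (m : Nat) (a n : Int), 1 ≤ a → (b - a).toNat = m →
    ((PySem.List.pyRange a b 1).foldl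
      (fun (st : Int × Int × Int) i =>
        let n' := if st.2.1 == st.2.2 then st.1 + 1 else st.1
        let x := (PySem.List.pyGet? numbers i).getD 0
        (n', st.2.1 + x, st.2.2 - x))
      (n, (numbers.take a.toNat).sum, numbers.sum - (numbers.take a.toNat).sum)).1
    = (PySem.List.pyRange a b 1).foldl
      (fun n i => if 2 * (PySem.List.pyGet? ((List.range numbers.length).map
          (fun k => (numbers.take (k + 1)).sum)) (i - 1)).getD 0 == numbers.sum
        then n + 1 else n) n := by
  intro m
  induction m with
  | zero =>
    intro a n ha hm
    rw [PySem.List.pyRange_one_eq_nil (by omega)]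
    simp
  | succ m ih =>
    intro a n ha hm
    have hab : a < b := by omega
    rw [PySem.List.pyRange_one_cons hab]
    simp only [List.foldl_cons]
    have hx : (PySem.List.pyGet? numbers a).getD 0 = numbers[a.toNat]! := by
      rw [PySem.List.pyGet?_of_nonneg _ (by omega)]
      rw [List.getElem?_eq_getElem (by omega)]
      rw [List.getElem!_eq_getElem?_getD, List.getElem?_eq_getElem (by omega)]
      rfl
    have hS : (numbers.take a.toNat).sum + numbers[a.toNat]! = (numbers.take (a + 1).toNat).sum := by
      have h1 : (a + 1).toNat = a.toNat + 1 := by omega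
      rw [h1, List.take_add_one, List.sum_append]
      rw [List.getElem?_eq_getElem (by omega)]
      simp [List.getElem!_eq_getElem?_getD, List.getElem?_eq_getElem (show a.toNat < numbers.length by omega)]
    have hcond : ((numbers.take a.toNat).sum == numbers.sum - (numbers.take a.toNat).sum)
        = (2 * (PySem.List.pyGet? ((List.range numbers.length).map
            (fun k => (numbers.take (k + 1)).sum)) (a - 1)).getD 0 == numbers.sum) := by
      rw [pv_table_get numbers a ha (by omega)]
      rw [beq_eq_beq]
      constructor <;> intro h <;> omega
    simp only [hx, hcond]
    have hsub : (numbers.sum - (numbers.take a.toNat).sum - numbers[a.toNat]!)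
        = numbers.sum - (numbers.take (a + 1).toNat).sum := by omega
    rw [hS, hsub]
    by_cases hc : (2 * (PySem.List.pyGet? ((List.range numbers.length).map
        (fun k => (numbers.take (k + 1)).sum)) (a - 1)).getD 0 == numbers.sum) = true
    · simp only [hc, if_true]
      exact ih (a + 1) (n + 1) (by omega) (by omega)
    · simp only [Bool.not_eq_true] at hc
      simp only [hc]
      exact ih (a + 1) n (by omega) (by omega)

-- ===== VERDICT (by name: the statement is the Claim_ definition above) =====
theorem stripe_spec : Claim_equal_stripe := by
  intro len_numbers numbers _ hpre
  obtain ⟨hne, hlen⟩ := hpre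
  unfold Spec_stripe stripe stripe_alt
  simp only [pv_table_eq numbers, pv_total numbers hne]
  obtain ⟨y, t, rfl⟩ := List.exists_cons_of_ne_nil hne
  have h1 : (PySem.List.pyGet? (y :: t) 0).getD 0 = ((y :: t).take ((1:Int).toNat)).sum := by
    simp
  have h2 : (PySem.List.slice (y :: t) (some 1) none).sum
      = (y :: t).sum - ((y :: t).take ((1:Int).toNat)).sum := by
    rw [PySem.List.slice_from_one]
    simp
  rw [h1, h2]
  exact pv_loop (y :: t) len_numbers hlen ((len_numbers - 1).toNat) 1 0 le_rfl rfl
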